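-- pv_equiv track=rewrite | github.com/uleso26/DEIA-26 | tools/query_understanding.py | _confidence_from_scores
-- ===== SOURCE A (Python) =====
-- ENTERPRISE_ROUTE_LABELS = {"Q1", "Q2", "Q3", "Q4", "Q5", "Q6"}
--
-- def _confidence_from_scores(question_class: str, scores: dict[str, int]) -> str:
--     if question_class not in ENTERPRISE_ROUTE_LABELS:
--         return "high"
--     ranked = sorted((scores.get(label, 0) for label in ENTERPRISE_ROUTE_LABELS), reverse=True)
--     top_score = ranked[0] if ranked else 0
--     second_score = ranked[1] if len(ranked) > 1 else 0
--     if top_score <= 1: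
--         return "low"
--     if top_score - second_score >= 2:
--         return "high"
--     return "medium"
-- ===== SOURCE B (Python) =====
-- ENTERPRISE_ROUTE_LABELS = {"Q1", "Q2", "Q3", "Q4", "Q5", "Q6"}
--
-- def _confidence_from_scores(question_class: str, scores: dict[str, int]) -> str:
--     if question_class not in ENTERPRISE_ROUTE_LABELS:
--         return "high"
--     # one pass over the six labels, tracking the largest and second-largest score
--     top = second = None
--     for label in ENTERPRISE_ROUTE_LABELS:
--         v = scores.get(label, 0)
--         if top is None or v > top:
--             top, second = v, top
--         elif second is None or v > second:
--             second = v
--     if top <= 1: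
--         return "low"
--     if top - second >= 2:
--         return "high"
--     return "medium"
-- ===== Notes on version B (the rewrite author's own statement) =====
-- stated objective: simpler
-- what changed: B drops the sort over the six scores and instead keeps the largest and second-largest score in one pass with two running variables.
import Mathlib
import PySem

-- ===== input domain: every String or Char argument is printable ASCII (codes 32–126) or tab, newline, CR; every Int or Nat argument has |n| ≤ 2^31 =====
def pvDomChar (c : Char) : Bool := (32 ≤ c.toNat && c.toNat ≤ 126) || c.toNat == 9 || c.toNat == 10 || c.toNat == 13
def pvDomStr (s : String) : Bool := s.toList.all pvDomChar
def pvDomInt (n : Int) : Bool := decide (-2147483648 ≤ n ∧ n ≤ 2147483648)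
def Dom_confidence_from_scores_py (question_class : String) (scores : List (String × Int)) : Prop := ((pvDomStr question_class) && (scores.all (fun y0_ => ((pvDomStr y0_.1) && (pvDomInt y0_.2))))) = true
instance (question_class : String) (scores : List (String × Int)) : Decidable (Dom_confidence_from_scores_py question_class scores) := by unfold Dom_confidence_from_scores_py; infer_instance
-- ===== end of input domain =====

-- B replaces the sort over the six label scores by a single pass tracking the two largest scores (simpler; same result).


-- ===== PORT A =====
-- ENTERPRISE_ROUTE_LABELS = {"Q1", ..., "Q6"}: a six-element set of distinct strings; ported as the
-- list of its elements.  A only iterates it under sorted(...), whose result does not depend on the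
-- iteration order of the set, and tests membership in it.
def pvLabels : List String := ["Q1", "Q2", "Q3", "Q4", "Q5", "Q6"]

def confidence_from_scores_py (question_class : String) (scores : List (String × Int)) : String :=
  if question_class ∉ pvLabels then "high"
  else
    let ranked := PySem.List.sorted (pvLabels.map (fun label => PySem.Dict.getD (PySem.Dict.mk scores) label 0)) (fun x => x) true
    let top_score := ranked.headD 0                                      -- ranked[0] if ranked else 0
    let second_score := if 1 < ranked.length then ranked.getD 1 0 else 0 -- ranked[1] if len(ranked) > 1 else 0
    if top_score ≤ 1 then "low"
    else if 2 ≤ top_score - second_score then "high"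
    else "medium"

-- ===== PORT B =====
-- one loop step of Source B: top/second are None until set
def pvStep (st : Option Int × Option Int) (v : Int) : Option Int × Option Int :=
  match st with
  | (none, _) => (some v, none)             -- top is None: top, second = v, top
  | (some t, second) =>
    if t < v then (some v, some t)          -- v > top: top, second = v, top
    else match second with
      | none => (some t, some v)            -- second is None: second = v
      | some s => if s < v then (some t, some v) else (some t, some s)

def confidence_from_scores_py_alt (question_class : String) (scores : List (String × Int)) : String :=
  if question_class ∉ pvLabels then "high"
  else
    match pvLabels.foldl (fun st label => pvStep st (PySem.Dict.getD (PySem.Dict.mk scores) label 0)) (none, none) with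
    | (some top, some second) =>
      if top ≤ 1 then "low"
      else if 2 ≤ top - second then "high"
      else "medium"
    | _ => "low"  -- unreachable: the loop over the six labels always sets both top and second

-- ===== PRECONDITION & SPEC =====
def Spec_confidence_from_scores_py (question_class : String) (scores : List (String × Int)) (out : String) : Prop := out = confidence_from_scores_py_alt question_class scores
instance (question_class : String) (scores : List (String × Int)) (out : String) : Decidable (Spec_confidence_from_scores_py question_class scores out) := by unfold Spec_confidence_from_scores_py; infer_instance

-- ===== CLAIM (what is proved, stated in full; the proofs are below) =====
def Claim_equal_confidence_from_scores_py : Prop := ∀ (question_class : String) (scores : List (String × Int)), Dom_confidence_from_scores_py question_class scores → Spec_confidence_from_scores_py question_class scores (confidence_from_scores_py question_class scores)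

-- ===== LEMMAS AND PROOFS =====

lemma pv_max?_concat (l : List Int) (v m : Int) (h : l.max? = some m) :
    (l ++ [v]).max? = some (max m v) := by
  rw [List.max?_eq_some_iff] at h ⊢
  obtain ⟨hm, hb⟩ := h
  constructor
  · rcases le_total m v with hc | hc
    · simp [max_eq_right hc]
    · simp [max_eq_left hc, hm]
  · intro b hb'
    rcases List.mem_append.mp hb' with h1 | h1
    · exact le_trans (hb b h1) (le_max_left m v)
    · simp at h1; subst h1; exact le_max_right m b

-- the loop invariant of B: the fold returns the maximum and the maximum of the rest
lemma pv_fold_char (l : List Int) (hne : l ≠ []) :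
    ∃ m, l.max? = some m ∧ l.foldl pvStep (none, none) = (some m, (l.erase m).max?) := by
  induction l using List.reverseRecOn with
  | nil => exact absurd rfl hne
  | append_singleton l v ih =>
    rcases eq_or_ne l [] with hl | hl
    · subst hl
      exact ⟨v, by simp [pvStep]⟩
    · obtain ⟨m, hmax, hfold⟩ := ih hl
      obtain ⟨hm, hub⟩ := List.max?_eq_some_iff.mp hmax
      rw [List.foldl_append, hfold]
      by_cases hv : m < v
      · refine ⟨v, ?_, ?_⟩
        · rw [pv_max?_concat l v m hmax, max_eq_right hv.le]
        · have hvnot : v ∉ l := fun hmem => absurd (hub v hmem) (not_le.mpr hv)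
          simp [pvStep, hv, List.erase_append_right [v] hvnot, hmax]
      · refine ⟨m, ?_, ?_⟩
        · rw [pv_max?_concat l v m hmax, max_eq_left (not_lt.mp hv)]
        · rw [List.erase_append_left [v] hm]
          rcases he : (l.erase m).max? with _ | s
          · have : l.erase m = [] := List.max?_eq_none_iff.mp he
            simp [pvStep, hv, this]
          · rw [pv_max?_concat _ v s he]
            by_cases hs : s < v
            · simp [pvStep, hv, hs, max_eq_right hs.le]
            · simp [pvStep, hv, hs, max_eq_left (not_lt.mp hs)]

-- the head of the descending sort is the maximum, the next element the maximum of the rest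
lemma pv_sort_char (l : List Int) (a : Int) (t : List Int)
    (hr : PySem.List.sorted l (fun x => x) true = a :: t) :
    l.max? = some a ∧ (l.erase a).max? = t.head? := by
  have hperm : (a :: t).Perm l := hr ▸ PySem.List.sorted_perm l (fun x => x) true
  have hal : a ∈ l := hperm.mem_iff.mp (List.mem_cons_self)
  have hub : ∀ y ∈ l, y ≤ a := PySem.List.key_head_sorted_rev_ge _ _ hr
  have hmax : l.max? = some a := List.max?_eq_some_iff.mpr ⟨hal, hub⟩
  refine ⟨hmax, ?_⟩
  have htperm : t.Perm (l.erase a) :=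
    (List.perm_cons a).mp (hperm.trans (List.perm_cons_erase hal))
  cases t with
  | nil =>
    have h0 : l.erase a = [] := htperm.symm.eq_nil
    simp [h0]
  | cons b t' =>
    have hpw : (a :: b :: t').Pairwise (fun x y => y ≤ x) :=
      hr ▸ PySem.List.sorted_pairwise_rev l (fun x => x)
    have hpw' : (b :: t').Pairwise (fun x y => y ≤ x) := (List.pairwise_cons.mp hpw).2
    have hub' : ∀ y ∈ b :: t', y ≤ b := by
      intro y hy
      rcases List.mem_cons.mp hy with h1 | h1
      · exact h1.le
      · exact (List.pairwise_cons.mp hpw').1 y h1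
    have : (l.erase a).max? = some b :=
      List.max?_eq_some_iff.mpr ⟨htperm.mem_iff.mp (List.mem_cons_self), by
        intro y hy; exact hub' y (htperm.mem_iff.mpr hy)⟩
    simp [this]

-- ===== VERDICT (by name: the statement is the Claim_ definition above) =====
theorem confidence_from_scores_py_spec : Claim_equal_confidence_from_scores_py := by
  intro question_class scores _
  unfold Spec_confidence_from_scores_py confidence_from_scores_py confidence_from_scores_py_alt
  by_cases hmem : question_class ∉ pvLabels
  · simp [hmem]
  · simp only [hmem]
    set vals := pvLabels.map (fun label => PySem.Dict.getD (PySem.Dict.mk scores) label 0) with hvals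
    have hfoldmap : pvLabels.foldl (fun st label => pvStep st (PySem.Dict.getD (PySem.Dict.mk scores) label 0)) (none, none)
        = vals.foldl pvStep (none, none) := by rw [hvals, List.foldl_map]
    have hlen : vals.length = 6 := by simp [hvals, pvLabels]
    have hvne : vals ≠ [] := by intro h; rw [h] at hlen; simp at hlen
    obtain ⟨m, hmax, hfold⟩ := pv_fold_char vals hvne
    have hrlen : (PySem.List.sorted vals (fun x => x) true).length = 6 := by
      rw [PySem.List.length_sorted]; exact hlen
    rcases hr : PySem.List.sorted vals (fun x => x) true with _ | ⟨a, t⟩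
    · rw [hr] at hrlen; simp at hrlen
    obtain ⟨hmax', hsec⟩ := pv_sort_char vals a t hr
    have ham : m = a := by rw [hmax] at hmax'; exact Option.some_inj.mp hmax'
    rcases t with _ | ⟨b, t'⟩
    · rw [hr] at hrlen; simp at hrlen
    rw [hfoldmap, hfold, ham, hsec]
    simp [List.getD]
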